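-- pv_equiv track=rewrite | github.com/GLHFhah/kv-replication-2 | solution/node.py | merge_cart_values
-- ===== SOURCE A (Python) =====
-- from typing import List, Dict, Any, Optional
--
-- def merge_cart_values(values: List[str]) -> str:
--     items = set()
--     for v in values:
--         if v:
--             for item in v.split(','):
--                 if item:
--                     items.add(item.strip())
--     return ",".join(sorted(list(items)))
-- ===== SOURCE B (Python) =====
-- def merge_cart_values(values):
--     toks = []
--     for v in values:
--         if v:
--             for item in v.split(','):
--                 if item:
--                     toks.append(item.strip())
--     toks.sort()
--     out = []
--     for t in toks:
--         if not out or out[-1] != t: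
--             out.append(t)
--     return ",".join(out)
-- ===== Notes on version B (the rewrite author's own statement) =====
-- stated objective: alternative
-- what changed: Replaces the hash-set accumulation with a plain token list that is sorted once and deduplicated by a single adjacent-comparison pass before joining.
import Mathlib
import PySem

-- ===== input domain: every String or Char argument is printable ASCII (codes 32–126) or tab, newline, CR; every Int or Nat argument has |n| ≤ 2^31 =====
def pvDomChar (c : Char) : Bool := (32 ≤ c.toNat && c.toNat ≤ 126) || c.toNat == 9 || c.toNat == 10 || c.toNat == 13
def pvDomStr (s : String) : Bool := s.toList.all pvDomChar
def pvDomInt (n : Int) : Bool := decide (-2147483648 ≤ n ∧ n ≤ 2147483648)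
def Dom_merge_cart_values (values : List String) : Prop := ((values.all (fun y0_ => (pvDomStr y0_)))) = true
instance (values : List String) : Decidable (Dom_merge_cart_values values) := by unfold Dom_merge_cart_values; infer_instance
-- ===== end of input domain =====

-- B replaces A's hash-set accumulation with a plain token list that is sorted once and
-- deduplicated by a single adjacent-comparison pass (alternative decomposition, same result).

-- ===== PORT A =====
def merge_cart_values (values : List String) : String :=
  let items : PySem.Set String := values.foldl (fun items v =>
    if v ≠ "" then
      ((PySem.Str.split? v ",").getD []).foldl (fun items item =>
        if item ≠ "" then PySem.Set.add items (PySem.Str.strip item) else items) items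
    else items) PySem.Set.empty
  PySem.Str.join "," (PySem.List.sorted items (fun x => x) false)

-- ===== PORT B =====
def merge_cart_values_alt (values : List String) : String :=
  let toks : List String := values.foldl (fun acc v =>
    if v ≠ "" then
      ((PySem.Str.split? v ",").getD []).foldl (fun acc item =>
        if item ≠ "" then acc ++ [PySem.Str.strip item] else acc) acc
    else acc) []
  let st := PySem.List.sorted toks (fun x => x) false
  let out := st.foldl (fun out t =>
    if out = [] ∨ out.getLast? ≠ some t then out ++ [t] else out) []
  PySem.Str.join "," out

-- ===== PRECONDITION & SPEC =====
def Spec_merge_cart_values (values : List String) (out : String) : Prop := out = merge_cart_values_alt values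
instance (values : List String) (out : String) : Decidable (Spec_merge_cart_values values out) := by unfold Spec_merge_cart_values; infer_instance

-- ===== CLAIM (what is proved, stated in full; the proofs are below) =====
def Claim_equal_merge_cart_values : Prop := ∀ (values : List String), Dom_merge_cart_values values → Spec_merge_cart_values values (merge_cart_values values)

-- ===== LEMMAS AND PROOFS =====

-- B's inner token loop, run from any accumulator, appends to what it produces from []
theorem innerB_acc (l : List String) (acc : List String) :
    l.foldl (fun acc item => if item ≠ "" then acc ++ [PySem.Str.strip item] else acc) acc
      = acc ++ l.foldl (fun acc item => if item ≠ "" then acc ++ [PySem.Str.strip item] else acc) [] := by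
  induction l generalizing acc with
  | nil => simp
  | cons x xs ih =>
    simp only [List.foldl_cons]
    rw [ih, ih ((if x ≠ "" then [] ++ [PySem.Str.strip x] else []))]
    by_cases hx : x = "" <;> simp [hx]

-- A's inner set loop = update by B's inner token list
theorem inner_set_eq (l : List String) (s : PySem.Set String) :
    l.foldl (fun items item => if item ≠ "" then PySem.Set.add items (PySem.Str.strip item) else items) s
      = PySem.Set.update s (l.foldl (fun acc item => if item ≠ "" then acc ++ [PySem.Str.strip item] else acc) []) := by
  induction l generalizing s with
  | nil => rfl
  | cons x xs ih =>
    simp only [List.foldl_cons]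
    rw [ih]
    by_cases hx : x = ""
    · simp [hx]
    · have hx' : x ≠ "" := hx
      have h1 : PySem.Set.add s (PySem.Str.strip x) = PySem.Set.update s [PySem.Str.strip x] := by
        simp [PySem.Set.update]
      have h2 : PySem.Set.update s ([PySem.Str.strip x]
            ++ xs.foldl (fun acc item => if item ≠ "" then acc ++ [PySem.Str.strip item] else acc) [])
          = PySem.Set.update (PySem.Set.update s [PySem.Str.strip x])
              (xs.foldl (fun acc item => if item ≠ "" then acc ++ [PySem.Str.strip item] else acc) []) :=
        List.foldl_append ..
      rw [innerB_acc xs (if x ≠ "" then [] ++ [PySem.Str.strip x] else []),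
        if_pos hx', if_pos hx', List.nil_append, h2, ← h1]

-- B's outer token loop, run from any accumulator, appends to what it produces from []
theorem outerB_acc (values : List String) (acc : List String) :
    values.foldl (fun acc v =>
        if v ≠ "" then
          ((PySem.Str.split? v ",").getD []).foldl (fun acc item =>
            if item ≠ "" then acc ++ [PySem.Str.strip item] else acc) acc
        else acc) acc
      = acc ++ values.foldl (fun acc v =>
          if v ≠ "" then
            ((PySem.Str.split? v ",").getD []).foldl (fun acc item =>
              if item ≠ "" then acc ++ [PySem.Str.strip item] else acc) acc
          else acc) [] := by
  induction values generalizing acc with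
  | nil => simp
  | cons v vs ih =>
    simp only [List.foldl_cons]
    rw [ih, ih (if v ≠ "" then _ else [])]
    by_cases hv : v = ""
    · simp [hv]
    · simp only [hv, ne_eq, not_false_iff, if_true]
      rw [innerB_acc, List.append_assoc]

-- A's outer set accumulation = update by B's full token list
theorem outer_set_eq (values : List String) (s : PySem.Set String) :
    values.foldl (fun items v =>
        if v ≠ "" then
          ((PySem.Str.split? v ",").getD []).foldl (fun items item =>
            if item ≠ "" then PySem.Set.add items (PySem.Str.strip item) else items) items
        else items) s
      = PySem.Set.update s (values.foldl (fun acc v =>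
          if v ≠ "" then
            ((PySem.Str.split? v ",").getD []).foldl (fun acc item =>
              if item ≠ "" then acc ++ [PySem.Str.strip item] else acc) acc
          else acc) []) := by
  induction values generalizing s with
  | nil => rfl
  | cons v vs ih =>
    simp only [List.foldl_cons]
    rw [ih]
    by_cases hv : v = ""
    · simp [hv]
    · have hv' : v ≠ "" := hv
      have h2 : PySem.Set.update s
            (((PySem.Str.split? v ",").getD []).foldl (fun acc item =>
                if item ≠ "" then acc ++ [PySem.Str.strip item] else acc) []
              ++ vs.foldl (fun acc v =>
                  if v ≠ "" then
                    ((PySem.Str.split? v ",").getD []).foldl (fun acc item =>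
                      if item ≠ "" then acc ++ [PySem.Str.strip item] else acc) acc
                  else acc) [])
          = PySem.Set.update (PySem.Set.update s
              (((PySem.Str.split? v ",").getD []).foldl (fun acc item =>
                if item ≠ "" then acc ++ [PySem.Str.strip item] else acc) []))
              (vs.foldl (fun acc v =>
                  if v ≠ "" then
                    ((PySem.Str.split? v ",").getD []).foldl (fun acc item =>
                      if item ≠ "" then acc ++ [PySem.Str.strip item] else acc) acc
                  else acc) []) :=
        List.foldl_append ..
      rw [outerB_acc vs (if v ≠ "" then
            ((PySem.Str.split? v ",").getD []).foldl (fun acc item =>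
              if item ≠ "" then acc ++ [PySem.Str.strip item] else acc) []
          else []), if_pos hv', if_pos hv', inner_set_eq, h2]

def dedupStep (out : List String) (t : String) : List String :=
  if out = [] ∨ out.getLast? ≠ some t then out ++ [t] else out

-- membership through the adjacent-dedup fold
theorem mem_dedup_fold (ts : List String) (out : List String) (x : String) :
    x ∈ ts.foldl dedupStep out ↔ x ∈ out ∨ x ∈ ts := by
  induction ts generalizing out with
  | nil => simp
  | cons t ts ih =>
    simp only [List.foldl_cons, dedupStep]
    split_ifs with h
    · rw [ih]; simp [or_assoc]
    · push Not at h
      obtain ⟨hne, hlast⟩ := h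
      have ht : t ∈ out := List.mem_of_getLast? hlast
      rw [ih]
      constructor
      · rintro (h1 | h1)
        · exact Or.inl h1
        · exact Or.inr (List.mem_cons_of_mem _ h1)
      · rintro (h1 | h1)
        · exact Or.inl h1
        · rcases List.mem_cons.mp h1 with rfl | h2
          · exact Or.inl ht
          · exact Or.inr h2

-- in a strictly increasing list every element is at most the last
theorem le_getLast_of_pairwise (l : List String) :
    ∀ (x y : String), l.Pairwise (· < ·) → x ∈ l → l.getLast? = some y → x ≤ y := by
  induction l with
  | nil => intro x y _ hx _; simp at hx
  | cons a t ih =>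
    intro x y hp hx hl
    cases t with
    | nil =>
      simp at hx hl
      simp [hx, hl.symm]
    | cons b t' =>
      rw [List.getLast?_cons_cons] at hl
      have hy : y ∈ b :: t' := List.mem_of_getLast? hl
      rcases List.mem_cons.mp hx with rfl | hx'
      · exact le_of_lt (List.rel_of_pairwise_cons hp hy)
      · exact ih x y hp.of_cons hx' hl

-- the adjacent-dedup fold over a weakly sorted list yields a strictly sorted list
theorem pairwise_dedup_fold (ts : List String) :
    ∀ (out : List String), ts.Pairwise (· ≤ ·) → out.Pairwise (· < ·) →
    (∀ o ∈ out, ∀ t ∈ ts, o ≤ t) →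
    (ts.foldl dedupStep out).Pairwise (· < ·) := by
  induction ts with
  | nil => intro out _ hout _; exact hout
  | cons t ts ih =>
    intro out hts hout hsep
    simp only [List.foldl_cons, dedupStep]
    have hts' := hts.of_cons
    have htrel : ∀ t' ∈ ts, t ≤ t' := fun t' h => List.rel_of_pairwise_cons hts h
    split_ifs with h
    · apply ih (out ++ [t]) hts'
      · rw [List.pairwise_append]
        refine ⟨hout, List.pairwise_singleton _ _, ?_⟩
        intro o ho t' ht'
        rcases List.mem_singleton.mp ht' with rfl
        have hot : o ≤ t' := hsep o ho t' (by simp)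
        rcases eq_or_lt_of_le hot with rfl | hlt
        · exfalso
          have hne : out ≠ [] := List.ne_nil_of_mem ho
          rcases h with hnil | hlast
          · exact hne hnil
          · cases hg : out.getLast? with
            | none => exact hne (List.getLast?_eq_none_iff.mp hg)
            | some y =>
              have hy : y ∈ out := List.mem_of_getLast? hg
              have h1 : y ≤ o := hsep y hy o (by simp)
              have h2 : o ≤ y := le_getLast_of_pairwise out o y hout ho hg
              have : out.getLast? = some o := by rw [hg, le_antisymm h1 h2]
              exact hlast this
        · exact hlt
      · intro o ho t' ht'
        rcases List.mem_append.mp ho with ho' | ho'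
        · exact hsep o ho' t' (List.mem_cons_of_mem _ ht')
        · rcases List.mem_singleton.mp ho' with rfl
          exact htrel t' ht'
    · exact ih out hts' hout (fun o ho t' ht' => hsep o ho t' (List.mem_cons_of_mem _ ht'))

-- the deduped sorted token list IS sorted(set(toks))
theorem sorted_set_eq_dedup (toks : List String) :
    PySem.List.sorted (PySem.Set.ofList toks) (fun x => x) false
      = (PySem.List.sorted toks (fun x => x) false).foldl dedupStep [] := by
  have hstp : (PySem.List.sorted toks (fun x => x) false).Pairwise (· ≤ ·) :=
    PySem.List.sorted_pairwise toks (fun x => x)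
  have hD : ((PySem.List.sorted toks (fun x => x) false).foldl dedupStep []).Pairwise (· < ·) :=
    pairwise_dedup_fold _ [] hstp List.Pairwise.nil (by intro o ho; simp at ho)
  apply PySem.List.sorted_eq_of_perm_of_pairwise_lt
  · rw [List.perm_ext_iff_of_nodup (hD.imp ne_of_lt) (PySem.Set.nodup_ofList toks)]
    intro a
    rw [mem_dedup_fold, PySem.Set.mem_ofList, PySem.List.mem_sorted]
    simp
  · exact hD

-- ===== VERDICT (by name: the statement is the Claim_ definition above) =====
theorem merge_cart_values_spec : Claim_equal_merge_cart_values := by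
  intro values _
  unfold Spec_merge_cart_values merge_cart_values merge_cart_values_alt
  simp only
  rw [outer_set_eq]
  have : PySem.Set.update (α := String) PySem.Set.empty = PySem.Set.ofList := rfl
  rw [this, sorted_set_eq_dedup]
  rfl
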